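-- pv_equiv track=rewrite | github.com/henry-lang/phscpt-solutions | pclassic/p4.py | monsterMash
-- ===== SOURCE A (Python) =====
-- def monsterMash(arr, k):
--     done = False
--     stack = []
--     for i in range(len(arr)):
--         if len(stack) == 0:
--             stack.append([arr[i], 1])
--             continue
--         if arr[i] == stack[-1][0]:
--             stack[-1][1] += 1
--         else:
--             stack.append([arr[i], 1])
--         if stack[-1][1] == k:
--             stack.pop()
--     final = []
--     for val, num in stack:
--         for _ in range(num):
--             final.append(val)
--     return str(final)
-- ===== SOURCE B (Python) =====
-- def monsterMash(arr, k):
--     out = []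
--     for x in arr:
--         out.append(x)
--         if 1 <= k <= len(out) and out[-k:] == [x] * k:
--             del out[-k:]
--     return str(out)
-- ===== Notes on version B (the rewrite author's own statement) =====
-- stated objective: simpler
-- what changed: B keeps the result as one flat list and deletes the last k elements whenever they become equal, instead of A's run-length-encoded stack of [value,count] pairs with a separate expansion pass at the end.
-- intended difference: For k == 1 and nonempty arr, A's `continue` skips the removal check for any element pushed onto an empty stack, so such elements survive (A returns e.g. '[5]' on ([5],1)); B removes every length-1 run and returns '[]', the intended normal form for k=1. — e.g. on monsterMash([5], 1): A returns "[5]", B returns "[]"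
import Mathlib
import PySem

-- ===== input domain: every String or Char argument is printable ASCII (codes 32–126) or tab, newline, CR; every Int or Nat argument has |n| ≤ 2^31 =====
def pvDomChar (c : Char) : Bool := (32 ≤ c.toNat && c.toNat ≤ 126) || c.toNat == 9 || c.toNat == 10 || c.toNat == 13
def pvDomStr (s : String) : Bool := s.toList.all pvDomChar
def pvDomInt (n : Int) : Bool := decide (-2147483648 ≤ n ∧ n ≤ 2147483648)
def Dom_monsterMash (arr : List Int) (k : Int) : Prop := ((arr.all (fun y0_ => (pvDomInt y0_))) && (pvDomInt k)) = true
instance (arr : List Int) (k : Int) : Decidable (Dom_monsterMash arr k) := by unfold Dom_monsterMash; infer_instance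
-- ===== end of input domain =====

-- B maintains the result as one flat list, deleting the last k elements when they become equal,
-- instead of A's run-length stack of [value,count] pairs plus an expansion pass (objective: simpler).

-- shared rendering of Python's str(list_of_ints): "[a, b, c]" built at character level (exact for int lists)
def mmJoin : List (List Char) → List Char
  | [] => []
  | [c] => c
  | c :: cs => c ++ ',' :: ' ' :: mmJoin cs

def pyStrIntList (l : List Int) : String :=
  String.ofList ('[' :: (mmJoin (l.map PySem.Int.toChars) ++ [']']))

-- ===== PORT A =====
-- stack is kept head-first (head = Python's stack[-1]); `continue` after the empty-stack push
-- means the `== k` check is skipped for that element.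
def mmStepA (k : Int) (stack : List (Int × Int)) (x : Int) : List (Int × Int) :=
  match stack with
  | [] => [(x, 1)]
  | (v, c) :: rest =>
      if x = v then
        if c + 1 = k then rest else (v, c + 1) :: rest
      else
        if (1 : Int) = k then (v, c) :: rest else (x, 1) :: (v, c) :: rest

def monsterMash (arr : List Int) (k : Int) : String :=
  let stack := arr.foldl (mmStepA k) []
  let final := stack.reverse.foldl (fun acc p => acc ++ List.replicate p.2.toNat p.1) []
  pyStrIntList final

-- ===== PORT B =====
def mmStepB (k : Int) (out : List Int) (x : Int) : List Int :=
  let o := out ++ [x]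
  if (1 ≤ k ∧ k ≤ PySem.List.len o) ∧ PySem.List.slice o (some (-k)) none = List.replicate k.toNat x then
    PySem.List.slice o none (some (-k))          -- del out[-k:]
  else o

def monsterMash_alt (arr : List Int) (k : Int) : String :=
  pyStrIntList (arr.foldl (mmStepB k) [])

-- ===== PRECONDITION & SPEC =====
-- For k == 1 and nonempty arr, A's `continue` skips the removal check for any element pushed onto an
-- empty stack, so such elements survive (A returns e.g. "[5]" on ([5],1)); B removes every length-1
-- run and returns "[]", the intended normal form for k = 1.
def D_monsterMash (arr : List Int) (k : Int) : Prop := k = 1 ∧ arr ≠ []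
instance (arr : List Int) (k : Int) : Decidable (D_monsterMash arr k) := by unfold D_monsterMash; infer_instance

def Spec_monsterMash (arr : List Int) (k : Int) (out : String) : Prop := ¬ D_monsterMash arr k → out = monsterMash_alt arr k
instance (arr : List Int) (k : Int) (out : String) : Decidable (Spec_monsterMash arr k out) := by unfold Spec_monsterMash; infer_instance

def pvDiffWitness_monsterMash : List Int × Int := ([5], 1)
def pvDiffWitnessOut_monsterMash : String × String := ("[5]", "[]")

-- ===== CLAIM (what is proved, stated in full; the proofs are below) =====
def Claim_unchanged_monsterMash : Prop := ∀ (arr : List Int) (k : Int), Dom_monsterMash arr k → Spec_monsterMash arr k (monsterMash arr k)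
def Claim_changed_monsterMash : Prop := Dom_monsterMash (pvDiffWitness_monsterMash.1) (pvDiffWitness_monsterMash.2) ∧ D_monsterMash (pvDiffWitness_monsterMash.1) (pvDiffWitness_monsterMash.2) ∧ monsterMash (pvDiffWitness_monsterMash.1) (pvDiffWitness_monsterMash.2) = pvDiffWitnessOut_monsterMash.1 ∧ monsterMash_alt (pvDiffWitness_monsterMash.1) (pvDiffWitness_monsterMash.2) = pvDiffWitnessOut_monsterMash.2 ∧ pvDiffWitnessOut_monsterMash.1 ≠ pvDiffWitnessOut_monsterMash.2
def Claim_exact_monsterMash : Prop := ∀ (arr : List Int) (k : Int), Dom_monsterMash arr k → D_monsterMash arr k → monsterMash arr k ≠ monsterMash_alt arr k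

-- ===== LEMMAS AND PROOFS =====

-- expansion of the run-length stack (head = top) into the flat result, bottom first
def mmExpand : List (Int × Int) → List Int
  | [] => []
  | p :: t => mmExpand t ++ List.replicate p.2.toNat p.1

-- invariant of A's stack: adjacent entries carry distinct values; counts are ≥ 1 and below k (unless k ≤ 0)
def mmInv (k : Int) (st : List (Int × Int)) : Prop :=
  st.IsChain (fun a b => a.1 ≠ b.1) ∧ ∀ p ∈ st, 1 ≤ p.2 ∧ (p.2 < k ∨ k ≤ 0)

lemma toDigits_ne_nil (m : Nat) : Nat.toDigits 10 m ≠ [] := by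
  unfold Nat.toDigits
  show Nat.toDigitsCore 10 (m + 1) m [] ≠ []
  rw [Nat.toDigitsCore]
  split
  · simp
  · intro h
    have := Nat.toDigitsCore_lens_eq 10 m (m / 10) ((m % 10).digitChar) []
    rw [h] at this
    simp at this

lemma toChars_ne_nil (n : Int) : PySem.Int.toChars n ≠ [] := by
  unfold PySem.Int.toChars
  split
  · simp
  · exact toDigits_ne_nil _

lemma mmJoin_cons_ne (c : List Char) (cs : List (List Char)) (h : c ≠ []) : mmJoin (c :: cs) ≠ [] := by
  cases cs <;> simp [mmJoin, h]

lemma pyStr_ne_empty (a : Int) (t : List Int) : pyStrIntList (a :: t) ≠ "[]" := by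
  unfold pyStrIntList
  intro h
  have h2 : ('[' :: (mmJoin ((a :: t).map PySem.Int.toChars) ++ [']'])) = ['[', ']'] := by
    have := congrArg String.toList h
    simpa using this
  have h3 : mmJoin ((a :: t).map PySem.Int.toChars) ++ [']'] = [']'] := by
    simpa using h2
  have h4 : mmJoin ((a :: t).map PySem.Int.toChars) = [] := by
    have := congrArg List.length h3
    simp at this
    exact this
  exact mmJoin_cons_ne _ _ (toChars_ne_nil a) (by simpa using h4)

lemma rep_ne_nil (n : Nat) (x : Int) (h : 1 ≤ n) : List.replicate n x ≠ [] := by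
  simp; omega

lemma rep_getLast? (n : Nat) (x : Int) (h : 1 ≤ n) : (List.replicate n x).getLast? = some x := by
  rw [List.getLast?_replicate]; simp; omega

lemma mmExpand_getLast? (v c : Int) (t : List (Int × Int)) (hc : 1 ≤ c) :
    (mmExpand ((v, c) :: t)).getLast? = some v := by
  show (mmExpand t ++ List.replicate c.toNat v).getLast? = some v
  rw [List.getLast?_append, rep_getLast? _ _ (by omega)]
  rfl

lemma run_suffix (l : List Int) (x : Int) (m j : Nat)
    (hl : ∀ y, l.getLast? = some y → y ≠ x) (hj : 1 ≤ j) :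
    ((l ++ List.replicate m x).drop (l.length + m - j) = List.replicate j x) ↔ j ≤ m := by
  rw [List.drop_append, List.drop_replicate]
  constructor
  · intro h
    by_contra hjm
    push_neg at hjm
    have hd0 : m - (l.length + m - j - l.length) = 0 ∨ l.length + m - j ≤ l.length := by omega
    have hlen := congrArg List.length h
    simp at hlen
    have hjL : j ≤ l.length + m := by omega
    have hi : l.length + m - j - l.length = 0 := by omega
    rw [hi] at h
    simp at h
    -- h : l.drop (l.length + m - j) ++ rep m x = rep j x
    have hrep : List.replicate j x = List.replicate (j - m) x ++ List.replicate m x := by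
      rw [← List.replicate_add]; congr 1; omega
    rw [hrep] at h
    have heq := List.append_inj_left h (by simp; omega)
    have hne : l.drop (l.length + m - j) ≠ [] := by
      simp; omega
    have hlast : (l.drop (l.length + m - j)).getLast? = l.getLast? := by
      conv_rhs => rw [← List.take_append_drop (l.length + m - j) l]
      rw [List.getLast?_append]
      cases hgl : (List.drop (l.length + m - j) l).getLast? with
      | none => exact absurd (List.getLast?_eq_none_iff.mp hgl) hne
      | some y => rfl
    have hx : l.getLast? = some x := by
      rw [← hlast, heq, rep_getLast? _ _ (by omega)]
    exact hl x hx rfl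
  · intro h
    have h1 : l.length + m - j - l.length = m - j := by omega
    have h2 : l.drop (l.length + m - j) = [] := by
      apply List.drop_eq_nil_of_le; omega
    rw [h1, h2]
    simp
    congr 1
    omega


lemma slice_from_neg (o : List Int) (k : Int) (hk : 1 ≤ k) :
    PySem.List.slice o (some (-k)) none = o.drop (o.length - k.toNat) := by
  obtain ⟨K, rfl⟩ : ∃ K : Nat, k = (K : Int) := ⟨k.toNat, by omega⟩
  rw [PySem.List.slice_from_neg_natCast _ _ (by omega)]
  simp

lemma slice_to_neg (o : List Int) (k : Int) (hk : 1 ≤ k) :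
    PySem.List.slice o none (some (-k)) = o.take (o.length - k.toNat) := by
  obtain ⟨K, rfl⟩ : ∃ K : Nat, k = (K : Int) := ⟨k.toNat, by omega⟩
  rw [PySem.List.slice_to_neg_natCast _ _ (by omega)]
  simp

-- the B-side removal condition, characterised: with last run ending value x of length m and the
-- part before it not ending in x, the slice test holds iff k.toNat ≤ m
lemma cond_iff (l : List Int) (x : Int) (m : Nat) (k : Int) (hk : 1 ≤ k)
    (hl : ∀ y, l.getLast? = some y → y ≠ x) :
    (PySem.List.slice (l ++ List.replicate m x) (some (-k)) none = List.replicate k.toNat x)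
      ↔ k.toNat ≤ m := by
  rw [slice_from_neg _ _ hk]
  have hlen : (l ++ List.replicate m x).length = l.length + m := by simp
  rw [hlen]
  exact run_suffix l x m k.toNat hl (by omega)

lemma step_eq (k : Int) (hk : k ≠ 1) (st : List (Int × Int)) (x : Int) (h : mmInv k st) :
    mmStepB k (mmExpand st) x = mmExpand (mmStepA k st x) ∧ mmInv k (mmStepA k st x) := by
  obtain ⟨hchain, hcnt⟩ := h
  by_cases hk1 : 1 ≤ k
  · -- 2 ≤ k
    have hk2 : 2 ≤ k := by omega
    have hK : 2 ≤ k.toNat := by omega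
    cases st with
    | nil =>
        have hcond : ¬ (PySem.List.slice (([] : List Int) ++ List.replicate 1 x) (some (-k)) none
            = List.replicate k.toNat x) := by
          rw [cond_iff [] x 1 k hk1 (by simp)]
          omega
        constructor
        · show mmStepB k ([] : List Int) x = mmExpand [(x, 1)]
          simp only [mmStepB, mmExpand]
          rw [if_neg]
          · simp [List.replicate]
          · rintro ⟨_, hc⟩
            exact hcond (by simpa [List.replicate] using hc)
        · constructor
          · simp [mmStepA]
          · intro p hp
            simp only [mmStepA] at hp
            simp at hp
            subst hp
            simp
            omega
    | cons hd rest =>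
        obtain ⟨v, c⟩ := hd
        have hc1 : 1 ≤ c := (hcnt (v, c) (by simp)).1
        have hck : c < k := by
          rcases (hcnt (v, c) (by simp)).2 with h | h
          · exact h
          · omega
        have hlast : ∀ y, (mmExpand rest).getLast? = some y → y ≠ v := by
          intro y hy
          cases rest with
          | nil => simp [mmExpand] at hy
          | cons q r2 =>
              obtain ⟨v2, c2⟩ := q
              have h2 : 1 ≤ c2 := (hcnt (v2, c2) (by simp)).1
              rw [mmExpand_getLast? v2 c2 r2 h2] at hy
              cases hy
              have := (List.isChain_cons_cons.mp hchain).1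
              exact fun he => this (by simp [he])
        by_cases hxv : x = v
        · subst hxv
          -- o = mmExpand rest ++ replicate (c.toNat + 1) x
          have ho : mmExpand ((x, c) :: rest) ++ [x]
              = mmExpand rest ++ List.replicate (c.toNat + 1) x := by
            show (mmExpand rest ++ List.replicate c.toNat x) ++ [x] = _
            rw [List.append_assoc, List.replicate_succ' ]
          have hcond := cond_iff (mmExpand rest) x (c.toNat + 1) k hk1 hlast
          by_cases hpop : c + 1 = k
          · -- pop
            have hcondT : PySem.List.slice (mmExpand ((x, c) :: rest) ++ [x]) (some (-k)) none
                = List.replicate k.toNat x := by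
              rw [ho, hcond]; omega
            constructor
            · simp only [mmStepA, mmStepB]
              have hlenk : k ≤ PySem.List.len (mmExpand ((x, c) :: rest) ++ [x]) := by
                rw [ho]
                simp [PySem.List.len]
                omega
              rw [if_pos trivial, if_pos hpop, if_pos ⟨⟨hk1, hlenk⟩, hcondT⟩, ho,
                slice_to_neg _ _ hk1]
              have : (mmExpand rest ++ List.replicate (c.toNat + 1) x).length - k.toNat
                  = (mmExpand rest).length := by
                simp; omega
              rw [this, List.take_left']
              rfl
            · simp only [mmStepA]
              rw [if_pos trivial, if_pos hpop]
              exact ⟨(List.isChain_cons.mp hchain).2, fun p hp => hcnt p (by simp [hp])⟩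
          · -- no pop
            have hcondF : ¬ (PySem.List.slice (mmExpand ((x, c) :: rest) ++ [x]) (some (-k)) none
                = List.replicate k.toNat x) := by
              rw [ho, hcond]; omega
            constructor
            · simp only [mmStepA, mmStepB]
              rw [if_pos trivial, if_neg hpop]
              rw [if_neg (fun hc' => hcondF hc'.2), ho]
              show _ = mmExpand rest ++ List.replicate (c + 1).toNat x
              have htn : (c + 1).toNat = c.toNat + 1 := by omega
              rw [htn]
            · simp only [mmStepA]
              rw [if_pos trivial, if_neg hpop]
              constructor
              · cases rest with
                | nil => simp
                | cons q r2 =>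
                    rw [List.isChain_cons_cons] at hchain ⊢
                    exact ⟨hchain.1, hchain.2⟩
              · intro p hp
                rcases List.mem_cons.mp hp with h1 | h2
                · subst h1; constructor
                  · omega
                  · left; omega
                · exact hcnt p (by simp [h2])
        · -- x ≠ v : push
          have ho : mmExpand ((v, c) :: rest) ++ [x]
              = mmExpand ((v, c) :: rest) ++ List.replicate 1 x := by simp [List.replicate]
          have hlast2 : ∀ y, (mmExpand ((v, c) :: rest)).getLast? = some y → y ≠ x := by
            intro y hy
            rw [mmExpand_getLast? v c rest hc1] at hy
            cases hy
            exact fun he => hxv he.symm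
          have hcondF : ¬ (PySem.List.slice (mmExpand ((v, c) :: rest) ++ [x]) (some (-k)) none
              = List.replicate k.toNat x) := by
            rw [ho, cond_iff _ x 1 k hk1 hlast2]
            omega
          have hk1' : (1 : Int) ≠ k := by omega
          constructor
          · simp only [mmStepA, mmStepB]
            rw [if_neg hxv, if_neg hk1', if_neg (fun hc' => hcondF hc'.2)]
            show _ = mmExpand ((v, c) :: rest) ++ List.replicate (1 : Int).toNat x
            simp [List.replicate]
          · simp only [mmStepA]
            rw [if_neg hxv, if_neg hk1']
            constructor
            · rw [List.isChain_cons_cons]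
              exact ⟨by simpa using hxv, hchain⟩
            · intro p hp
              rcases List.mem_cons.mp hp with h1 | h2
              · subst h1; exact ⟨by omega, by left; omega⟩
              · exact hcnt p h2
  · -- k ≤ 0 : neither side ever removes
    have hnoB : ∀ o : List Int, mmStepB k o x = o ++ [x] := by
      intro o
      simp only [mmStepB]
      rw [if_neg (fun hc => hk1 hc.1.1)]
    cases st with
    | nil =>
        refine ⟨?_, ?_, ?_⟩
        · rw [hnoB]
          simp [mmStepA, mmExpand, List.replicate]
        · simp [mmStepA]
        · intro p hp; simp [mmStepA] at hp; subst hp; exact ⟨by simp, by right; omega⟩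
    | cons hd rest =>
        obtain ⟨v, c⟩ := hd
        have hc1 : 1 ≤ c := (hcnt (v, c) (by simp)).1
        by_cases hxv : x = v
        · subst hxv
          have hpop : ¬ (c + 1 = k) := by omega
          refine ⟨?_, ?_⟩
          · rw [hnoB]
            simp only [mmStepA]
            rw [if_pos trivial, if_neg hpop]
            show (mmExpand rest ++ List.replicate c.toNat x) ++ [x] = mmExpand rest ++ List.replicate (c + 1).toNat x
            rw [List.append_assoc]
            congr 1
            have : (c + 1).toNat = c.toNat + 1 := by omega
            rw [this, List.replicate_succ']
          · simp only [mmStepA]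
            rw [if_pos trivial, if_neg hpop]
            constructor
            · cases rest with
              | nil => simp
              | cons q r2 =>
                  rw [List.isChain_cons_cons] at hchain ⊢
                  exact ⟨hchain.1, hchain.2⟩
            · intro p hp
              rcases List.mem_cons.mp hp with h1 | h2
              · subst h1; exact ⟨by omega, by right; omega⟩
              · exact hcnt p (by simp [h2])
        · have hk1' : (1 : Int) ≠ k := by omega
          refine ⟨?_, ?_⟩
          · rw [hnoB]
            simp only [mmStepA]
            rw [if_neg hxv, if_neg hk1']
            show _ = mmExpand ((v, c) :: rest) ++ List.replicate (1 : Int).toNat x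
            simp [List.replicate]
          · simp only [mmStepA]
            rw [if_neg hxv, if_neg hk1']
            constructor
            · rw [List.isChain_cons_cons]
              exact ⟨by simpa using hxv, hchain⟩
            · intro p hp
              rcases List.mem_cons.mp hp with h1 | h2
              · subst h1; exact ⟨by omega, by right; omega⟩
              · exact hcnt p h2


lemma fold_eq (k : Int) (hk : k ≠ 1) (arr : List Int) (st : List (Int × Int)) (h : mmInv k st) :
    arr.foldl (mmStepB k) (mmExpand st) = mmExpand (arr.foldl (mmStepA k) st) := by
  induction arr generalizing st with
  | nil => simp
  | cons a t ih =>
      have h' := step_eq k hk st a h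
      simp only [List.foldl_cons, h'.1]
      exact ih _ h'.2

lemma final_eq (st : List (Int × Int)) :
    st.reverse.foldl (fun acc p => acc ++ List.replicate p.2.toNat p.1) [] = mmExpand st := by
  induction st with
  | nil => simp [mmExpand]
  | cons p t ih => simp [mmExpand, List.foldl_append, ih]

-- k = 1: B's accumulator stays empty
lemma stepB_one (x : Int) : mmStepB 1 [] x = [] := by
  simp only [mmStepB]
  rw [if_pos, slice_to_neg _ _ (by omega)]
  · simp
  · refine ⟨⟨by omega, by simp [PySem.List.len]⟩, ?_⟩
    rw [slice_from_neg _ _ (by omega)]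
    simp [List.replicate]

lemma foldB_one (arr : List Int) : arr.foldl (mmStepB 1) [] = [] := by
  induction arr with
  | nil => rfl
  | cons a t ih => simpa [stepB_one] using ih

-- k = 1: A's stack, once nonempty, stays nonempty with counts ≥ 1
lemma foldA_one (arr : List Int) (st : List (Int × Int)) (hne : st ≠ [])
    (hc : ∀ p ∈ st, 1 ≤ p.2) :
    arr.foldl (mmStepA 1) st ≠ [] ∧ ∀ p ∈ arr.foldl (mmStepA 1) st, 1 ≤ p.2 := by
  induction arr generalizing st with
  | nil => exact ⟨hne, hc⟩
  | cons a t ih =>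
      simp only [List.foldl_cons]
      cases st with
      | nil => exact absurd rfl hne
      | cons hd rest =>
          obtain ⟨v, c⟩ := hd
          have hc1 : 1 ≤ c := hc (v, c) (by simp)
          by_cases hav : a = v
          · subst hav
            have hnp : ¬ (c + 1 = (1 : Int)) := by omega
            have hstep : mmStepA 1 ((a, c) :: rest) a = (a, c + 1) :: rest := by
              simp only [mmStepA]
              rw [if_pos trivial, if_neg hnp]
            rw [hstep]
            refine ih _ (by simp) ?_
            intro p hp
            rcases List.mem_cons.mp hp with h1 | h2
            · subst h1; omega
            · exact hc p (by simp [h2])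
          · have hstep : mmStepA 1 ((v, c) :: rest) a = (v, c) :: rest := by
              simp only [mmStepA]
              rw [if_neg hav, if_pos trivial]
            rw [hstep]
            exact ih _ (by simp) hc

-- ===== VERDICT (by name: the statement is the Claim_ definition above) =====
lemma mmExpand_ne_nil (p : Int × Int) (t : List (Int × Int)) (hp : 1 ≤ p.2) :
    mmExpand (p :: t) ≠ [] := by
  show mmExpand t ++ List.replicate p.2.toNat p.1 ≠ []
  intro h
  rcases List.append_eq_nil_iff.mp h with ⟨_, h2⟩
  exact rep_ne_nil _ _ (by omega) h2

lemma monsterMash_eq (arr : List Int) (k : Int) :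
    monsterMash arr k = pyStrIntList (mmExpand (arr.foldl (mmStepA k) [])) := by
  show pyStrIntList ((arr.foldl (mmStepA k) []).reverse.foldl
    (fun acc p => acc ++ List.replicate p.2.toNat p.1) []) = _
  rw [final_eq]

-- ===== VERDICT (by name: the statement is the Claim_ definition above) =====
theorem monsterMash_spec : Claim_unchanged_monsterMash := by
  intro arr k _hdom hD'
  by_cases harr : arr = []
  · subst harr; rfl
  · have hk : k ≠ 1 := fun h => hD' ⟨h, harr⟩
    show monsterMash arr k = monsterMash_alt arr k
    rw [monsterMash_eq]
    unfold monsterMash_alt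
    congr 1
    have := fold_eq k hk arr [] ⟨by simp, by simp⟩
    simpa [mmExpand] using this.symm

theorem monsterMash_changed : Claim_changed_monsterMash := by
  unfold Claim_changed_monsterMash; decide

theorem monsterMash_tight : Claim_exact_monsterMash := by
  intro arr k _hdom hD
  obtain ⟨hk, hne⟩ := hD
  subst hk
  cases arr with
  | nil => exact absurd rfl hne
  | cons a t =>
      have hB : monsterMash_alt (a :: t) 1 = "[]" := by
        unfold monsterMash_alt
        rw [foldB_one]
        decide
      rw [hB]
      rw [monsterMash_eq]
      have hst := foldA_one t [(a, 1)] (by simp) (by intro p hp; simp at hp; subst hp; simp)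
      have hfold : (a :: t).foldl (mmStepA 1) [] = t.foldl (mmStepA 1) [(a, 1)] := by
        simp only [List.foldl_cons]
        rfl
      rw [hfold]
      cases hcase : t.foldl (mmStepA 1) [(a, 1)] with
      | nil => exact absurd hcase hst.1
      | cons p t2 =>
          have hp1 : 1 ≤ p.2 := (hst.2 p (by rw [hcase]; simp))
          cases hexp : mmExpand (p :: t2) with
          | nil => exact absurd hexp (mmExpand_ne_nil p t2 hp1)
          | cons b u => exact pyStr_ne_empty b u
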